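-- pv_equiv track=rewrite | github.com/shyam-sreenivasan/fun-projects | solutions.py | split_string_with_binary_patterns
-- ===== SOURCE A (Python) =====
-- def split_string_with_binary_patterns(s, total_spaces):
--     def has_ones_equal_to(bstring, total_spaces):
--         count = 0
--         for i in bstring:
--             if count > total_spaces:
--                 return False
--             if i == "1":
--                 count += 1
--
--         return count == total_spaces
--
--     max_spaces = len(s) - 1
--     total_combinations = 2**max_spaces
--     patterns = []
--     for i in range(total_combinations):
--         pattern = str(bin(i))[2:]
--         pattern = "0"*(len(s) - len(pattern)) + pattern
--         if has_ones_equal_to(pattern, total_spaces):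
--             patterns.append(pattern)
--
--     gen_strings = []
--     for pat in patterns:
--         gen_string = s
--         for i, c in enumerate(pat):
--             if c == "1":
--                 gen_string = gen_string[:i] + " " + gen_string[i:]
--                 gen_strings.append(gen_string)
--     return gen_strings
-- ===== SOURCE B (Python) =====
-- def split_string_with_binary_patterns(s, total_spaces):
--     # Enumerate only the patterns with exactly total_spaces ones (in increasing
--     # binary order) instead of filtering all 2**(len(s)-1) bit strings.
--     def gen(m, k):
--         # all length-m 0/1 lists with exactly k ones, in increasing binary order
--         if k < 0 or k > m:
--             return []
--         if m == 0:
--             return [[]]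
--         return [["0"] + t for t in gen(m - 1, k)] + [["1"] + t for t in gen(m - 1, k - 1)]
--
--     res = []
--     n = len(s)
--     for t in gen(n - 1, total_spaces):
--         positions = [i + 1 for i, c in enumerate(t) if c == "1"]
--         g = s
--         for p in positions:
--             g = g[:p] + " " + g[p:]
--             res.append(g)
--     return res
-- ===== Notes on version B (the rewrite author's own statement) =====
-- stated objective: faster
-- what changed: A enumerates all 2**(len(s)-1) binary patterns and filters those with exactly total_spaces ones; B recursively generates only the patterns with exactly total_spaces ones, in the same increasing binary order, and inserts spaces at the extracted positions.
import Mathlib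
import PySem

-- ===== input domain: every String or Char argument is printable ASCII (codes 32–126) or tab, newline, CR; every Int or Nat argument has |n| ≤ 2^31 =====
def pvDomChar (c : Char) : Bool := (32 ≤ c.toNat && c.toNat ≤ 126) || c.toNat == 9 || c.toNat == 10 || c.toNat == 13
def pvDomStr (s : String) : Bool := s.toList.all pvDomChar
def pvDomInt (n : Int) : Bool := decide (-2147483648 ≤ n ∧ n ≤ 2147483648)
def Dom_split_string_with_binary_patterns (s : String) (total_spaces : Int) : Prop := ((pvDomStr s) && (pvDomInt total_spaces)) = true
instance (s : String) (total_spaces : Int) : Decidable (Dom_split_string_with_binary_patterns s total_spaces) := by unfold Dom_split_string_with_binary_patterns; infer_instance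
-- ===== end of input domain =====

-- B replaces A's filter over all 2^(len(s)-1) bit strings by a recursive generator that
-- builds only the patterns with exactly total_spaces ones, in the same increasing binary order.

-- ===== PORT A =====
-- helper has_ones_equal_to: the early 'return False' becomes the 'if … then false' branch
def pvHasOnes (bstring : List Char) (total_spaces count : Int) : Bool :=
  match bstring with
  | [] => count == total_spaces
  | c :: rest =>
    if count > total_spaces then false
    else pvHasOnes rest total_spaces (if c == '1' then count + 1 else count)

def split_string_with_binary_patterns (s : String) (total_spaces : Int) : List String :=
  let cs := s.toList
  let max_spaces : Int := (cs.length : Int) - 1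
  -- Python computes 2 ** max_spaces: exact whenever s ≠ "" (then max_spaces ≥ 0); on s = "" Python raises (excluded by Pre_)
  let total_combinations : Int := 2 ^ max_spaces.toNat
  let patterns : List (List Char) :=
    (PySem.List.pyRange 0 total_combinations 1).foldl (fun acc i =>
      let pattern := PySem.Int.toBinChars i      -- str(bin(i))[2:] for i ≥ 0
      -- "0"*(len(s) - len(pattern)) + pattern  (the difference is ≥ 0 for every i in the range)
      let pattern := List.replicate (cs.length - pattern.length) '0' ++ pattern
      if pvHasOnes pattern total_spaces 0 then acc ++ [pattern] else acc) []
  patterns.foldl (fun gen_strings pat =>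
    ((PySem.List.enumerate pat 0).foldl (fun (st : List Char × List String) ic =>
        if ic.2 == '1' then
          -- gen_string[:i] + " " + gen_string[i:]
          let g := PySem.List.slice st.1 none (some ic.1) ++ ' ' :: PySem.List.slice st.1 (some ic.1) none
          (g, st.2 ++ [String.mk g])
        else st) (cs, gen_strings)).2) []

-- ===== PORT B =====
-- gen(m, k): all length-m 0/1 lists with exactly k ones, in increasing binary order
def pvGen (m : Nat) (k : Int) : List (List Char) :=
  if k < 0 ∨ (m : Int) < k then []
  else match m with
    | 0 => [[]]
    | m' + 1 => (pvGen m' k).map (fun t => '0' :: t) ++ (pvGen m' (k - 1)).map (fun t => '1' :: t)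

def split_string_with_binary_patterns_alt (s : String) (total_spaces : Int) : List String :=
  let cs := s.toList
  -- n - 1 as Nat subtraction: equal to Python's n-1 for s ≠ "" (Pre_)
  (pvGen (cs.length - 1) total_spaces).foldl (fun res t =>
    let positions := (PySem.List.enumerate t 0).filterMap (fun ic => if ic.2 == '1' then some (ic.1 + 1) else none)
    (positions.foldl (fun (st : List Char × List String) p =>
      let g := PySem.List.slice st.1 none (some p) ++ ' ' :: PySem.List.slice st.1 (some p) none
      (g, st.2 ++ [String.mk g])) (cs, res)).2) []

-- ===== PRECONDITION & SPEC =====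
-- Pre_ excludes only the empty string, on which A raises TypeError (2 ** -1 is a float, range() rejects it)
def Pre_split_string_with_binary_patterns (s : String) (total_spaces : Int) : Prop := s.toList ≠ []
instance (s : String) (total_spaces : Int) : Decidable (Pre_split_string_with_binary_patterns s total_spaces) := by unfold Pre_split_string_with_binary_patterns; infer_instance

def pvWitness_split_string_with_binary_patterns : String × Int := ("abc", 2)

def Spec_split_string_with_binary_patterns (s : String) (total_spaces : Int) (out : List String) : Prop := out = split_string_with_binary_patterns_alt s total_spaces
instance (s : String) (total_spaces : Int) (out : List String) : Decidable (Spec_split_string_with_binary_patterns s total_spaces out) := by unfold Spec_split_string_with_binary_patterns; infer_instance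

-- ===== CLAIM (what is proved, stated in full; the proofs are below) =====
def Claim_equal_split_string_with_binary_patterns : Prop := ∀ (s : String) (total_spaces : Int), Dom_split_string_with_binary_patterns s total_spaces → Pre_split_string_with_binary_patterns s total_spaces → Spec_split_string_with_binary_patterns s total_spaces (split_string_with_binary_patterns s total_spaces)

-- ===== LEMMAS AND PROOFS =====

def pvBinC (n : Nat) : List Char :=
  if h : n = 0 then [] else pvBinC (n / 2) ++ [if n % 2 == 1 then '1' else '0']
  decreasing_by exact Nat.div_lt_self (Nat.pos_of_ne_zero h) one_lt_two

def pvBinS (n : Nat) : List Char := if n = 0 then ['0'] else pvBinC n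

def pvPad (m : Nat) (t : List Char) : List Char := List.replicate (m - t.length) '0' ++ t

def pvAllB : Nat → List (List Char)
  | 0 => [[]]
  | m + 1 => (pvAllB m).map (fun t => '0' :: t) ++ (pvAllB m).map (fun t => '1' :: t)

lemma pvBinC_eq (n : Nat) (h : n ≠ 0) :
    pvBinC n = pvBinC (n / 2) ++ [if n % 2 == 1 then '1' else '0'] := by
  rw [pvBinC]; simp [h]

lemma pvBinC_zero : pvBinC 0 = [] := by rw [pvBinC]; simp

lemma pvBinS_one : pvBinS 1 = ['1'] := by
  rw [pvBinS]; simp; rw [pvBinC_eq 1 (by omega)]; simp [pvBinC_zero]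

lemma toDigitsCore_eq (f : Nat) : ∀ (n : Nat) (acc : List Char), n < f →
    Nat.toDigitsCore 2 f n acc = pvBinS n ++ acc := by
  induction f with
  | zero => intro n acc h; omega
  | succ f ih =>
    intro n acc h
    rw [Nat.toDigitsCore]
    by_cases h2 : n / 2 = 0
    · have hn : n = 0 ∨ n = 1 := by omega
      rcases hn with rfl | rfl
      · simp [pvBinS, Nat.digitChar]
      · simp [pvBinS_one, Nat.digitChar]
    · have hn : n ≠ 0 := by omega
      simp only [h2, ite_false]
      rw [ih (n / 2) _ (by omega)]
      rw [show pvBinS n = pvBinC n from by simp [pvBinS, hn], pvBinC_eq n hn,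
          show pvBinS (n / 2) = pvBinC (n / 2) from by simp [pvBinS, h2]]
      have hm : n % 2 = 0 ∨ n % 2 = 1 := by omega
      rcases hm with hm | hm <;> simp [hm, Nat.digitChar]

lemma toBinChars_eq (j : Nat) : PySem.Int.toBinChars (j : Int) = pvBinS j := by
  rw [PySem.Int.toBinChars]
  simp [Nat.toDigits, toDigitsCore_eq (j + 1) j [] (by omega)]



lemma hasOnes_eq (bs : List Char) (k : Int) : ∀ c : Int,
    pvHasOnes bs k c = decide (c + (bs.count '1' : Int) = k) := by
  induction bs with
  | nil =>
    intro c
    simp only [pvHasOnes, List.count_nil, Nat.cast_zero, add_zero]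
    rw [Bool.eq_iff_iff, beq_iff_eq, decide_eq_true_eq]
  | cons x rest ih =>
    intro c
    simp only [pvHasOnes, List.count_cons]
    by_cases hc : c > k
    · have h0 : (0:Int) ≤ ((rest.count '1' + if x == '1' then 1 else 0 : Nat) : Int) :=
        Int.natCast_nonneg _
      simp only [if_pos hc]
      rw [Bool.eq_iff_iff]
      simp only [Bool.false_eq_true, false_iff, decide_eq_true_eq]
      omega
    · simp only [if_neg hc, ih]
      by_cases hx : x = '1'
      · simp only [hx, beq_self_eq_true, if_pos]
        rw [Bool.eq_iff_iff, decide_eq_true_eq, decide_eq_true_eq]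
        push_cast
        omega
      · have hx' : (x == '1') = false := by simp [hx]
        simp only [hx', Bool.false_eq_true, if_false]
        rw [Bool.eq_iff_iff, decide_eq_true_eq, decide_eq_true_eq]
        push_cast
        omega

lemma len_pvBinC (m : Nat) : ∀ i : Nat, i < 2 ^ m → (pvBinC i).length ≤ m := by
  induction m with
  | zero => intro i h; have : i = 0 := by omega
            subst this; simp [pvBinC_zero]
  | succ m ih =>
    intro i h
    by_cases hi : i = 0
    · subst hi; simp [pvBinC_zero]
    · rw [pvBinC_eq i hi]
      have h2 : 2 ^ (m + 1) = 2 * 2 ^ m := by ring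
      have := ih (i / 2) (by omega)
      simp only [List.length_append, List.length_singleton]
      omega

lemma pad_succ (m : Nat) (t : List Char) (h : t.length ≤ m) :
    pvPad (m + 1) t = '0' :: pvPad m t := by
  unfold pvPad
  rw [show m + 1 - t.length = (m - t.length) + 1 by omega, List.replicate_succ, List.cons_append]

lemma length_pvPad (m : Nat) (t : List Char) (h : t.length ≤ m) : (pvPad m t).length = m := by
  simp [pvPad]; omega

lemma pvBinC_pow_add (m : Nat) : ∀ i : Nat, i < 2 ^ m →
    pvBinC (2 ^ m + i) = '1' :: pvPad m (pvBinC i) := by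
  induction m with
  | zero =>
    intro i h
    have : i = 0 := by omega
    subst this
    rw [show 2 ^ 0 + 0 = 1 by norm_num, pvBinC_eq 1 (by omega)]
    simp [pvBinC_zero, pvPad]
  | succ m ih =>
    intro i h
    have h2 : 2 ^ (m + 1) = 2 * 2 ^ m := by ring
    have hne : 2 ^ (m + 1) + i ≠ 0 := by positivity
    rw [pvBinC_eq _ hne]
    have hdiv : (2 ^ (m + 1) + i) / 2 = 2 ^ m + i / 2 := by omega
    have hmod : (2 ^ (m + 1) + i) % 2 = i % 2 := by omega
    rw [hdiv, hmod, ih (i / 2) (by omega), List.cons_append]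
    congr 1
    by_cases hi : i = 0
    · subst hi
      simp only [Nat.zero_div, pvBinC_zero, pvPad, List.length_nil, Nat.sub_zero,
        List.append_nil, List.replicate_succ']
      norm_num
    · rw [pvBinC_eq i hi]
      unfold pvPad
      have hl : (pvBinC (i / 2)).length ≤ m := len_pvBinC m (i / 2) (by omega)
      simp only [List.length_append, List.length_singleton]
      rw [show m + 1 - ((pvBinC (i / 2)).length + 1) = m - (pvBinC (i / 2)).length by omega]
      simp [List.append_assoc]

lemma pvPad_eq_self (m : Nat) (t : List Char) (h : m ≤ t.length) : pvPad m t = t := by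
  simp [pvPad, Nat.sub_eq_zero_of_le h]

lemma pvBinS_pad (m : Nat) (j : Nat) (h : j < 2 ^ m) :
    pvPad (m + 1) (pvBinS j) = '0' :: pvPad m (pvBinC j) := by
  by_cases hj : j = 0
  · subst hj
    rw [show pvBinS 0 = ['0'] from rfl, pvBinC_zero]
    simp only [pvPad, List.length_cons, List.length_nil, Nat.sub_zero, List.append_nil,
      Nat.add_sub_cancel]
    rw [← List.replicate_succ', List.replicate_succ]
  · rw [show pvBinS j = pvBinC j from by simp [pvBinS, hj]]
    exact pad_succ m _ (len_pvBinC m j h)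

lemma map_range_pad (m : Nat) :
    (List.range (2 ^ m)).map (fun j => pvPad m (pvBinC j)) = pvAllB m := by
  induction m with
  | zero =>
    simp [pvAllB, List.range_one, pvBinC_zero, pvPad]
  | succ m ih =>
    have h2 : 2 ^ (m + 1) = 2 ^ m + 2 ^ m := by ring
    rw [h2, List.range_add, List.map_append, List.map_map]
    have hfirst : (List.range (2 ^ m)).map (fun j => pvPad (m + 1) (pvBinC j))
        = (pvAllB m).map (fun t => '0' :: t) := by
      rw [← ih, List.map_map]
      apply List.map_congr_left
      intro j hj
      simp only [Function.comp]
      exact pad_succ m _ (len_pvBinC m j (List.mem_range.mp hj))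
    have hsecond : (List.range (2 ^ m)).map ((fun j => pvPad (m + 1) (pvBinC j)) ∘ (fun x => 2 ^ m + x))
        = (pvAllB m).map (fun t => '1' :: t) := by
      rw [← ih, List.map_map]
      apply List.map_congr_left
      intro j hj
      have hj' := List.mem_range.mp hj
      simp only [Function.comp]
      rw [pvBinC_pow_add m j hj']
      exact pvPad_eq_self _ _ (by simp [length_pvPad m _ (len_pvBinC m j hj')])
    rw [show pvAllB (m + 1) = (pvAllB m).map (fun t => '0' :: t) ++ (pvAllB m).map (fun t => '1' :: t) from rfl]
    rw [hfirst, hsecond]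

lemma mem_pvAllB_length (m : Nat) : ∀ t : List Char, t ∈ pvAllB m → t.length = m := by
  induction m with
  | zero => intro t ht; simp [pvAllB] at ht; simp [ht]
  | succ m ih =>
    intro t ht
    simp only [pvAllB, List.mem_append, List.mem_map] at ht
    rcases ht with ⟨a, ha, rfl⟩ | ⟨a, ha, rfl⟩ <;> simp [ih a ha]

lemma gen_eq_filter (m : Nat) : ∀ k : Int,
    pvGen m k = (pvAllB m).filter (fun t => ((t.count '1' : Int) == k)) := by
  induction m with
  | zero =>
    intro k
    rw [pvGen]
    by_cases hk : k < 0 ∨ ((0 : Nat) : Int) < k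
    · rw [if_pos hk]
      push_cast at hk
      simp only [pvAllB, List.filter_cons, List.count_nil, Nat.cast_zero, List.filter_nil]
      rw [show ((0 : Int) == k) = false from by rw [beq_eq_false_iff_ne]; omega]
      simp
    · rw [if_neg hk]
      have hk0 : k = 0 := by push_cast at hk; omega
      subst hk0
      simp [pvAllB]
  | succ m ih =>
    intro k
    rw [pvGen]
    by_cases hk : k < 0 ∨ ((m + 1 : Nat) : Int) < k
    · rw [if_pos hk]
      symm
      rw [List.filter_eq_nil_iff]
      intro t ht
      have hl := mem_pvAllB_length (m + 1) t ht
      have hc : t.count '1' ≤ t.length := List.count_le_length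
      rw [Bool.not_eq_true, beq_eq_false_iff_ne]
      push_cast at hk
      omega
    · rw [if_neg hk]
      show (pvGen m k).map (fun t => '0' :: t) ++ (pvGen m (k - 1)).map (fun t => '1' :: t) = _
      rw [ih k, ih (k - 1)]
      simp only [pvAllB, List.filter_append, List.filter_map]
      congr 1 <;>
      · congr 1
        apply List.filter_congr
        intro t _
        simp only [Function.comp, List.count_cons]
        try norm_num
        try rw [Bool.eq_iff_iff, beq_iff_eq, beq_iff_eq]
        try omega


lemma inner_fold (l : List (Int × Char)) : ∀ st : List Char × List String,
    l.foldl (fun st ic =>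
      if ic.2 == '1' then
        let g := PySem.List.slice st.1 none (some ic.1) ++ ' ' :: PySem.List.slice st.1 (some ic.1) none
        (g, st.2 ++ [String.mk g])
      else st) st
    = (l.filterMap (fun ic => if ic.2 == '1' then some ic.1 else none)).foldl (fun st p =>
        let g := PySem.List.slice st.1 none (some p) ++ ' ' :: PySem.List.slice st.1 (some p) none
        (g, st.2 ++ [String.mk g])) st := by
  induction l with
  | nil => intro st; rfl
  | cons ic l ih =>
    intro st
    rcases ic with ⟨i, c⟩
    by_cases hc : c = '1'
    · simp only [List.foldl_cons, List.filterMap_cons, hc, beq_self_eq_true, if_pos]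
      exact ih _
    · have hc' : (c == '1') = false := by simp [hc]
      simp only [List.foldl_cons, List.filterMap_cons, hc', Bool.false_eq_true, if_false]
      exact ih st

lemma enumerate_shift (t : List Char) : ∀ s : Int,
    (PySem.List.enumerate t (s + 1)).filterMap (fun ic => if ic.2 == '1' then some ic.1 else none)
    = (PySem.List.enumerate t s).filterMap (fun ic => if ic.2 == '1' then some (ic.1 + 1) else none) := by
  induction t with
  | nil => intro s; simp [PySem.List.enumerate_nil]
  | cons c t ih =>
    intro s
    rw [PySem.List.enumerate_cons, PySem.List.enumerate_cons]
    simp only [List.filterMap_cons]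
    by_cases hc : c = '1'
    · simp only [hc, beq_self_eq_true, if_pos]
      rw [ih (s + 1)]
    · have hc' : (c == '1') = false := by simp [hc]
      simp only [hc', Bool.false_eq_true, if_false]
      exact ih (s + 1)

lemma patterns_eq (cs : List Char) (k : Int) (h : cs ≠ []) :
    (PySem.List.pyRange 0 ((2 : Int) ^ (((cs.length : Int) - 1).toNat)) 1).foldl (fun acc i =>
      if pvHasOnes (List.replicate (cs.length - (PySem.Int.toBinChars i).length) '0' ++ PySem.Int.toBinChars i) k 0
      then acc ++ [List.replicate (cs.length - (PySem.Int.toBinChars i).length) '0' ++ PySem.Int.toBinChars i]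
      else acc) []
    = (pvGen (cs.length - 1) k).map (fun t => '0' :: t) := by
  obtain ⟨m, hm⟩ : ∃ m, cs.length = m + 1 := by
    cases cs with
    | nil => exact absurd rfl h
    | cons a l => exact ⟨l.length, rfl⟩
  rw [hm]
  have htn : (((m + 1 : Nat) : Int) - 1).toNat = m := by omega
  rw [htn, Nat.add_sub_cancel]
  rw [PySem.List.foldl_append_if]
  simp only [List.nil_append]
  rw [PySem.List.pyRange_one]
  have h2 : ((2 : Int) ^ m - 0).toNat = 2 ^ m := by
    rw [sub_zero, show ((2:Int) ^ m) = ((2 ^ m : Nat) : Int) from by push_cast; ring,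
      Int.toNat_natCast]
  rw [h2, List.filter_map, List.map_map]
  have key : ∀ j ∈ List.range (2 ^ m),
      (List.replicate (m + 1 - (PySem.Int.toBinChars (0 + (j : Int))).length) '0'
        ++ PySem.Int.toBinChars (0 + (j : Int))) = '0' :: pvPad m (pvBinC j) := by
    intro j hj
    rw [show ((0 : Int) + (j : Int)) = (j : Int) from by ring, toBinChars_eq]
    exact pvBinS_pad m j (List.mem_range.mp hj)
  rw [List.filter_congr (fun j hj => by
    simp only [Function.comp]
    rw [key j hj])]
  rw [List.map_congr_left (fun j hj => by
    simp only [Function.comp]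
    rw [key j (List.mem_filter.mp hj).1])]
  have hpred : ∀ j : Nat,
      (pvHasOnes ('0' :: pvPad m (pvBinC j)) k 0) = ((((pvPad m (pvBinC j)).count '1' : Nat) : Int) == k) := by
    intro j
    rw [hasOnes_eq, Bool.eq_iff_iff, decide_eq_true_eq, beq_iff_eq]
    simp only [List.count_cons]
    norm_num
  rw [List.filter_congr (fun j _ => hpred j)]
  rw [show (fun j : Nat => '0' :: pvPad m (pvBinC j))
        = (fun t : List Char => '0' :: t) ∘ (fun j : Nat => pvPad m (pvBinC j)) from rfl]
  rw [← List.map_map]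
  congr 1
  rw [gen_eq_filter m k, ← map_range_pad m, List.filter_map]
  rfl

-- ===== VERDICT (by name: the statement is the Claim_ definition above) =====
theorem split_string_with_binary_patterns_spec : Claim_equal_split_string_with_binary_patterns := by
  intro s ts _ hpre
  unfold Spec_split_string_with_binary_patterns
  simp only [split_string_with_binary_patterns, split_string_with_binary_patterns_alt]
  rw [patterns_eq s.toList ts hpre, List.foldl_map]
  congr 1
  funext acc t
  dsimp only
  rw [PySem.List.enumerate_cons]
  simp only [List.foldl_cons]
  rw [if_neg (by decide : ¬ (('0' == '1') = true))]
  rw [inner_fold, enumerate_shift t 0]
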